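-- pv_equiv track=rewrite | github.com/aduriseti/nemotron | reasoners/cryptarithm_solver/python_solver_arith_pm1_abs.py | _b1_from_units
-- ===== SOURCE A (Python) =====
-- def _b1_from_units(op_name: str, a1: int, uval: int, is_neg: bool, used: set) -> list:
--     if op_name == 'add':
--         b1 = (uval - a1 + 10) % 10
--         return [b1] if b1 not in used else []
--     if op_name == 'add1':
--         b1 = (uval - a1 - 1 + 20) % 10
--         return [b1] if b1 not in used else []
--     if op_name == 'addm1':
--         b1 = (uval - a1 + 1 + 10) % 10
--         return [b1] if b1 not in used else []
--     if op_name == 'sub':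
--         b1 = (a1 - uval + 10) % 10 if not is_neg else (uval + a1) % 10
--         return [b1] if b1 not in used else []
--     if op_name == 'mul':
--         return [b for b in range(10) if (a1 * b) % 10 == uval and b not in used]
--     if op_name == 'mul1':
--         target = (uval - 1 + 10) % 10
--         return [b for b in range(10) if (a1 * b) % 10 == target and b not in used]
--     if op_name == 'mulm1':
--         target = (uval + 1) % 10
--         return [b for b in range(10) if (a1 * b) % 10 == target and b not in used]
--     return []
-- ===== SOURCE B (Python) =====
-- def _b1_from_units(op_name: str, a1: int, uval: int, is_neg: bool, used: set) -> list:
--     preds = {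
--         'add':   lambda b: (a1 + b) % 10 == uval % 10,
--         'add1':  lambda b: (a1 + b + 1) % 10 == uval % 10,
--         'addm1': lambda b: (a1 + b - 1) % 10 == uval % 10,
--         'sub':   lambda b: ((b - a1) % 10 == uval % 10) if is_neg else ((a1 - b) % 10 == uval % 10),
--         'mul':   lambda b: (a1 * b) % 10 == uval,
--         'mul1':  lambda b: (a1 * b) % 10 == (uval - 1) % 10,
--         'mulm1': lambda b: (a1 * b) % 10 == (uval + 1) % 10,
--     }
--     pred = preds.get(op_name)
--     if pred is None:
--         return []
--     return [b for b in range(10) if pred(b) and b not in used]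
-- ===== Notes on version B (the rewrite author's own statement) =====
-- stated objective: alternative
-- what changed: Replaces the per-op closed-form modular arithmetic (computing the unique digit for add/sub ops) with a uniform table of digit predicates and a single search over range(10) filtered by the predicate and the used set.
import Mathlib
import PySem

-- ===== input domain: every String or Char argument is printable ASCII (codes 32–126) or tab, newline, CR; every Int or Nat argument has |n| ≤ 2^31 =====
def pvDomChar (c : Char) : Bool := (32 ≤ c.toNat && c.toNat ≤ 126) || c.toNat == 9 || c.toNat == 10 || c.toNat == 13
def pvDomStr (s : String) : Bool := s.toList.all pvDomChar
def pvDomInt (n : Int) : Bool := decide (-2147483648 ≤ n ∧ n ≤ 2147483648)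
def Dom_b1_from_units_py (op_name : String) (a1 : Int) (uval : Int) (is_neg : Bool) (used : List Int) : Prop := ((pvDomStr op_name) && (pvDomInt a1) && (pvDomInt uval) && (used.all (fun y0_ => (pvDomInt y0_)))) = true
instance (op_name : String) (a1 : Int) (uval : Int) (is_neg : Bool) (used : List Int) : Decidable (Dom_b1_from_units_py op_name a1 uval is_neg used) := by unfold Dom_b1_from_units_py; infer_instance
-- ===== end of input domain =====

-- B replaces A's per-op closed-form modular arithmetic by a uniform table of digit
-- predicates searched over 0..9 (objective: alternative decomposition, same cost).

-- ===== PORT A =====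
def b1_from_units_py (op_name : String) (a1 : Int) (uval : Int) (is_neg : Bool) (used : List Int) : List Int :=
  if op_name = "add" then
    let b1 := PySem.Int.mod (uval - a1 + 10) 10
    if used.contains b1 then [] else [b1]
  else if op_name = "add1" then
    let b1 := PySem.Int.mod (uval - a1 - 1 + 20) 10
    if used.contains b1 then [] else [b1]
  else if op_name = "addm1" then
    let b1 := PySem.Int.mod (uval - a1 + 1 + 10) 10
    if used.contains b1 then [] else [b1]
  else if op_name = "sub" then
    let b1 := if !is_neg then PySem.Int.mod (a1 - uval + 10) 10 else PySem.Int.mod (uval + a1) 10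
    if used.contains b1 then [] else [b1]
  else if op_name = "mul" then
    (PySem.List.pyRange 0 10 1).filter (fun b => (PySem.Int.mod (a1 * b) 10 == uval) && !(used.contains b))
  else if op_name = "mul1" then
    let target := PySem.Int.mod (uval - 1 + 10) 10
    (PySem.List.pyRange 0 10 1).filter (fun b => (PySem.Int.mod (a1 * b) 10 == target) && !(used.contains b))
  else if op_name = "mulm1" then
    let target := PySem.Int.mod (uval + 1) 10
    (PySem.List.pyRange 0 10 1).filter (fun b => (PySem.Int.mod (a1 * b) 10 == target) && !(used.contains b))
  else []

-- ===== PORT B =====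
-- Source B's dict of per-op predicate lambdas; dict.get rendered as the literal-key lookup chain
def pvAltPred (op_name : String) (a1 : Int) (uval : Int) (is_neg : Bool) : Option (Int → Bool) :=
  if op_name = "add" then some (fun b => PySem.Int.mod (a1 + b) 10 == PySem.Int.mod uval 10)
  else if op_name = "add1" then some (fun b => PySem.Int.mod (a1 + b + 1) 10 == PySem.Int.mod uval 10)
  else if op_name = "addm1" then some (fun b => PySem.Int.mod (a1 + b - 1) 10 == PySem.Int.mod uval 10)
  else if op_name = "sub" then some (fun b =>
    if is_neg then PySem.Int.mod (b - a1) 10 == PySem.Int.mod uval 10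
    else PySem.Int.mod (a1 - b) 10 == PySem.Int.mod uval 10)
  else if op_name = "mul" then some (fun b => PySem.Int.mod (a1 * b) 10 == uval)
  else if op_name = "mul1" then some (fun b => PySem.Int.mod (a1 * b) 10 == PySem.Int.mod (uval - 1) 10)
  else if op_name = "mulm1" then some (fun b => PySem.Int.mod (a1 * b) 10 == PySem.Int.mod (uval + 1) 10)
  else none

def b1_from_units_py_alt (op_name : String) (a1 : Int) (uval : Int) (is_neg : Bool) (used : List Int) : List Int :=
  match pvAltPred op_name a1 uval is_neg with
  | none => []
  | some p => (PySem.List.pyRange 0 10 1).filter (fun b => p b && !(used.contains b))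

-- ===== PRECONDITION & SPEC =====
def Spec_b1_from_units_py (op_name : String) (a1 : Int) (uval : Int) (is_neg : Bool) (used : List Int) (out : List Int) : Prop := out = b1_from_units_py_alt op_name a1 uval is_neg used
instance (op_name : String) (a1 : Int) (uval : Int) (is_neg : Bool) (used : List Int) (out : List Int) : Decidable (Spec_b1_from_units_py op_name a1 uval is_neg used out) := by unfold Spec_b1_from_units_py; infer_instance

-- ===== CLAIM (what is proved, stated in full; the proofs are below) =====
def Claim_equal_b1_from_units_py : Prop := ∀ (op_name : String) (a1 : Int) (uval : Int) (is_neg : Bool) (used : List Int), Dom_b1_from_units_py op_name a1 uval is_neg used → Spec_b1_from_units_py op_name a1 uval is_neg used (b1_from_units_py op_name a1 uval is_neg used)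

-- ===== LEMMAS AND PROOFS =====

-- PySem.Int.mod with positive modulus is Int.emod (so that omega can reason about it)
lemma pv_m10 (a : Int) : PySem.Int.mod a 10 = a % 10 :=
  PySem.Int.mod_eq_emod_of_pos (by norm_num)

-- filtering the digits 0..9 by a predicate whose unique root in 0..9 is b1 gives A's singleton/empty list
lemma pv_filt (q : Int → Bool) (b1 : Int) (h0 : 0 ≤ b1) (h9 : b1 < 10)
    (hq : ∀ b : Int, 0 ≤ b → b < 10 → q b = (b == b1)) (used : List Int) :
    (PySem.List.pyRange 0 10 1).filter (fun b => q b && !(used.contains b)) =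
      (if used.contains b1 then [] else [b1]) := by
  have hr : PySem.List.pyRange 0 10 1 = [0,1,2,3,4,5,6,7,8,9] := by decide
  have hcong : ∀ b ∈ ([0,1,2,3,4,5,6,7,8,9] : List Int),
      (q b && !(used.contains b)) = ((b == b1) && !(used.contains b)) := by
    intro b hb
    fin_cases hb <;> rw [hq _ (by norm_num) (by norm_num)]
  rw [hr, List.filter_congr hcong]
  by_cases hc : used.contains b1 <;> interval_cases b1 <;> simp_all [List.filter]

theorem b1_from_units_py_spec : Claim_equal_b1_from_units_py := by
  intro op_name a1 uval is_neg used _hdom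
  unfold Spec_b1_from_units_py
  by_cases h1 : op_name = "add"
  · subst h1
    rw [show b1_from_units_py_alt "add" a1 uval is_neg used =
          (PySem.List.pyRange 0 10 1).filter
            (fun b => (PySem.Int.mod (a1 + b) 10 == PySem.Int.mod uval 10) && !(used.contains b)) from rfl,
        pv_filt _ (PySem.Int.mod (uval - a1 + 10) 10)
          (by rw [pv_m10]; omega) (by rw [pv_m10]; omega)
          (fun b hb0 hb9 => by
            simp only [pv_m10]; rw [Bool.eq_iff_iff]; simp only [beq_iff_eq]; omega)]
    rfl
  by_cases h2 : op_name = "add1"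
  · subst h2
    rw [show b1_from_units_py_alt "add1" a1 uval is_neg used =
          (PySem.List.pyRange 0 10 1).filter
            (fun b => (PySem.Int.mod (a1 + b + 1) 10 == PySem.Int.mod uval 10) && !(used.contains b)) from rfl,
        pv_filt _ (PySem.Int.mod (uval - a1 - 1 + 20) 10)
          (by rw [pv_m10]; omega) (by rw [pv_m10]; omega)
          (fun b hb0 hb9 => by
            simp only [pv_m10]; rw [Bool.eq_iff_iff]; simp only [beq_iff_eq]; omega)]
    rfl
  by_cases h3 : op_name = "addm1"
  · subst h3
    rw [show b1_from_units_py_alt "addm1" a1 uval is_neg used =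
          (PySem.List.pyRange 0 10 1).filter
            (fun b => (PySem.Int.mod (a1 + b - 1) 10 == PySem.Int.mod uval 10) && !(used.contains b)) from rfl,
        pv_filt _ (PySem.Int.mod (uval - a1 + 1 + 10) 10)
          (by rw [pv_m10]; omega) (by rw [pv_m10]; omega)
          (fun b hb0 hb9 => by
            simp only [pv_m10]; rw [Bool.eq_iff_iff]; simp only [beq_iff_eq]; omega)]
    rfl
  by_cases h4 : op_name = "sub"
  · subst h4
    cases is_neg
    · rw [show b1_from_units_py_alt "sub" a1 uval false used =
            (PySem.List.pyRange 0 10 1).filter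
              (fun b => (PySem.Int.mod (a1 - b) 10 == PySem.Int.mod uval 10) && !(used.contains b)) from rfl,
          pv_filt _ (PySem.Int.mod (a1 - uval + 10) 10)
            (by rw [pv_m10]; omega) (by rw [pv_m10]; omega)
            (fun b hb0 hb9 => by
              simp only [pv_m10]; rw [Bool.eq_iff_iff]; simp only [beq_iff_eq]; omega)]
      rfl
    · rw [show b1_from_units_py_alt "sub" a1 uval true used =
            (PySem.List.pyRange 0 10 1).filter
              (fun b => (PySem.Int.mod (b - a1) 10 == PySem.Int.mod uval 10) && !(used.contains b)) from rfl,
          pv_filt _ (PySem.Int.mod (uval + a1) 10)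
            (by rw [pv_m10]; omega) (by rw [pv_m10]; omega)
            (fun b hb0 hb9 => by
              simp only [pv_m10]; rw [Bool.eq_iff_iff]; simp only [beq_iff_eq]; omega)]
      rfl
  by_cases h5 : op_name = "mul"
  · subst h5; rfl
  by_cases h6 : op_name = "mul1"
  · subst h6
    rw [show b1_from_units_py "mul1" a1 uval is_neg used =
          (PySem.List.pyRange 0 10 1).filter
            (fun b => (PySem.Int.mod (a1 * b) 10 == PySem.Int.mod (uval - 1 + 10) 10) && !(used.contains b)) from rfl,
        show PySem.Int.mod (uval - 1 + 10) 10 = PySem.Int.mod (uval - 1) 10 from by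
          simp only [pv_m10]; omega]
    rfl
  by_cases h7 : op_name = "mulm1"
  · subst h7; rfl
  simp only [b1_from_units_py, b1_from_units_py_alt, pvAltPred,
    if_neg h1, if_neg h2, if_neg h3, if_neg h4, if_neg h5, if_neg h6, if_neg h7]
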